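/- GENERATED by c/gen_decode.py: decode facts of the image, one per distinct instruction byte string. -/
import UserX.DecodeImage

#decode_all Vorbis.Dec
  "0f570526700100"  -- xorps xmm0,XMMWORD PTR [rip+0x17026]
  "0f8494000000"  -- je 10c338
  "0f8553ffffff"  -- jne 108a98
  "0f8d35010000"  -- jge 10de04
  "0f9ec0"  -- setle al
  "0fb77d00"  -- movzx edi,WORD PTR [rbp+0x0]
  "3c1e"  -- cmp al,0x1e
  "410fb6845f41040000"  -- movzx eax,BYTE PTR [r15+rbx*2+0x441]
  "41807e1b00"  -- cmp BYTE PTR [r14+0x1b],0x0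
  "418987e4060000"  -- mov DWORD PTR [r15+0x6e4],eax
  "418d2c04"  -- lea ebp,[r12+rax*1]
  "41d3e6"  -- shl r14d,cl
  "440fb6f0"  -- movzx r14d,al
  "443bbb84000000"  -- cmp r15d,DWORD PTR [rbx+0x84]
  "4489a308070000"  -- mov DWORD PTR [rbx+0x708],r12d
  "448b642424"  -- mov r12d,DWORD PTR [rsp+0x24]
  "448bbd24ffffff"  -- mov r15d,DWORD PTR [rbp-0xdc]
  "45882c24"  -- mov BYTE PTR [r12],r13b
  "458b7708"  -- mov r14d,DWORD PTR [r15+0x8]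
  "4803b7a8000000"  -- add rsi,QWORD PTR [rdi+0xa8]
  "4863d8"  -- movsxd rbx,eax
  "4883c460"  -- add rsp,0x60
  "4889542470"  -- mov QWORD PTR [rsp+0x70],rdx
  "488b142510f01f00"  -- mov rdx,QWORD PTR ds:0x1ff010
  "488b8424c80b0000"  -- mov rax,QWORD PTR [rsp+0xbc8]
  "488d4707"  -- lea rax,[rdi+0x7]
  "488d7bf8"  -- lea rdi,[rbx-0x8]
  "488dbb04070000"  -- lea rdi,[rbx+0x704]
  "488dbceb98050000"  -- lea rdi,[rbx+rbp*8+0x598]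
  "48c1ef03"  -- shr rdi,0x3
  "49035e08"  -- add rbx,QWORD PTR [r14+0x8]
  "4983ec08"  -- sub r12,0x8
  "498d3446"  -- lea rsi,[r14+rax*2]
  "498d7f10"  -- lea rdi,[r15+0x10]
  "4a036cfb08"  -- add rbp,QWORD PTR [rbx+r15*8+0x8]
  "4b8d7c3409"  -- lea rdi,[r12+r14*1+0x9]
  "4c896310"  -- mov QWORD PTR [rbx+0x10],r12
  "4c8b64dd00"  -- mov r12,QWORD PTR [rbp+rbx*8+0x0]
  "4c8d3cc3"  -- lea r15,[rbx+rax*8]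
  "4d63fd"  -- movsxd r15,r13d
  "4e8b6ced00"  -- mov r13,QWORD PTR [rbp+r13*8+0x0]
  "660f6eed"  -- movd xmm5,ebp
  "6641f7c40080"  -- test r12w,0x8000
  "7304"  -- jae 1146d2
  "7464"  -- je 108e91
  "7586"  -- jne 1114da
  "7cb9"  -- jl 108b6d
  "7edd"  -- jle 1044b9
  "81e3ff030000"  -- and ebx,0x3ff
  "83e3f8"  -- and ebx,0xfffffff8
  "894580"  -- mov DWORD PTR [rbp-0x80],eax
  "89956cffffff"  -- mov DWORD PTR [rbp-0x94],edx
  "8b442438"  -- mov eax,DWORD PTR [rsp+0x38]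
  "8b7da4"  -- mov edi,DWORD PTR [rbp-0x5c]
  "8d441b02"  -- lea eax,[rbx+rbx*1+0x2]
  "be10070000"  -- mov esi,0x710
  "c703ffffffff"  -- mov DWORD PTR [rbx],0xffffffff
  "c783e800c000f3f3f3f3"  -- mov DWORD PTR [rbx+0xc000e8],0xf3f3f3f3
  "e80595ffff"  -- call 101520
  "e80efffeff"  -- call 103d00
  "e818f5feff"  -- call 100300
  "e82270ffff"  -- call 100640
  "e82bd7feff"  -- call 100640
  "e83571ffff"  -- call 100640
  "e83ffdffff"  -- call 10e320
  "e849f0ffff"  -- call 112da0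
  "e855d3feff"  -- call 100640
  "e862f2feff"  -- call 100800
  "e86e24ffff"  -- call 100300
  "e879a7feff"  -- call 100300
  "e884d4feff"  -- call 100640
  "e88f68ffff"  -- call 102380
  "e898fafeff"  -- call 100800
  "e8a394ffff"  -- call 100640
  "e8ae65ffff"  -- call 10b100
  "e8b785ffff"  -- call 10d1c0
  "e8c1bcfeff"  -- call 100800
  "e8caf9ffff"  -- call 100059
  "e8d5c1feff"  -- call 1003c0
  "e8e02fffff"  -- call 100640
  "e8e98cffff"  -- call 103f80
  "e8f15fffff"  -- call 10b100
  "e8fc91ffff"  -- call 100800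
  "e92effffff"  -- jmp 114c6f
  "e976e5ffff"  -- jmp 113b22
  "e9cde6ffff"  -- jmp 113b22
  "eb2c"  -- jmp 107614
  "ebbc"  -- jmp 1035c5
  "f20f101d93d60100"  -- movsd xmm3,QWORD PTR [rip+0x1d693]
  "f20f59c2"  -- mulsd xmm0,xmm2
  "f30f1023"  -- movss xmm4,DWORD PTR [rbx]
  "f30f10642408"  -- movss xmm4,DWORD PTR [rsp+0x8]
  "f30f1143ec"  -- movss DWORD PTR [rbx-0x14],xmm0
  "f30f11642414"  -- movss DWORD PTR [rsp+0x14],xmm4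
  "f30f58442414"  -- addss xmm0,DWORD PTR [rsp+0x14]
  "f30f595d40"  -- mulss xmm3,DWORD PTR [rbp+0x40]
  "f30f5cd8"  -- subss xmm3,xmm0
  "f3410f114424f0"  -- movss DWORD PTR [r12-0x10],xmm0
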